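-- pv_equiv track=rewrite | github.com/rubytaken/mutation-testing-tool | src/mutation_tool/engine/generator.py | _position_to_offset
-- ===== SOURCE A (Python) =====
-- def _position_to_offset(source: str, line: int, col: int) -> int:
--     current_line = 1
--     offset = 0
--     for chunk in source.splitlines(keepends=True):
--         if current_line == line:
--             return offset + col
--         offset += len(chunk)
--         current_line += 1
--     return len(source)
-- ===== SOURCE B (Python) =====
-- def _position_to_offset(source: str, line: int, col: int) -> int:
--     # Build a table of line-start offsets, then answer by direct indexed lookup.
--     starts = [0] if source else []
--     n = len(source)
--     i = 0
--     while i < n: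
--         c = source[i]
--         if c == '\r':
--             i += 2 if i + 1 < n and source[i + 1] == '\n' else 1
--             if i < n:
--                 starts.append(i)
--         elif c == '\n':
--             i += 1
--             if i < n:
--                 starts.append(i)
--         else:
--             i += 1
--     if 1 <= line <= len(starts):
--         return starts[line - 1] + col
--     return n
-- ===== Notes on version B (the rewrite author's own statement) =====
-- stated objective: alternative
-- what changed: Replaces A's counting scan over splitlines chunks with early return by building a line-start offset table in one index-driven character scan and answering with a range check plus one direct indexed lookup.
import Mathlib
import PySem

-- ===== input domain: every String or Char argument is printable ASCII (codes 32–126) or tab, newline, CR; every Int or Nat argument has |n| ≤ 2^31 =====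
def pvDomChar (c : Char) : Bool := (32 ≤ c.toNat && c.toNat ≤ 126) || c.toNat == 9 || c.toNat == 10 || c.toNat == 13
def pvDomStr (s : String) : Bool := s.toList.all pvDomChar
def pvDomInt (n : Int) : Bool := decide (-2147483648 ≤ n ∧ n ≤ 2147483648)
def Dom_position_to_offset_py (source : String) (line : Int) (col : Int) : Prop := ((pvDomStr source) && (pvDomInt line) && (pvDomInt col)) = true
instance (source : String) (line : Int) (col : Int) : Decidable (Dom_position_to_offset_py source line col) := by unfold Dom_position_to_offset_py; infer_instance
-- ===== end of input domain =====

-- B builds a line-start offset table in one indexed scan and answers by a range check and a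
-- direct lookup, instead of A's splitlines+counting loop with early return (alternative decomposition).

-- ===== PORT A =====
-- hand port of source.splitlines(keepends=True): exact for the terminators '\n', '\r', '\r\n',
-- which are the only line breaks occurring in the printable-ASCII+tab/LF/CR input domain
def splitKEAux (acc : List Char) (s : List Char) : List (List Char) :=
  match s with
  | [] => if acc = [] then [] else [acc.reverse]
  | c :: r =>
    if c = '\r' then
      if r.head? = some '\n' then (acc.reverse ++ ['\r', '\n']) :: splitKEAux [] r.tail
      else (acc.reverse ++ ['\r']) :: splitKEAux [] r
    else if c = '\n' then (acc.reverse ++ ['\n']) :: splitKEAux [] r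
    else splitKEAux (c :: acc) r
termination_by s.length
decreasing_by all_goals simp [List.length_tail]

-- A's for-loop over the chunks, with current_line and offset as state; early return on the match
def aLoop (chunks : List (List Char)) (currentLine : Int) (offset : Int) (line col srcLen : Int) : Int :=
  match chunks with
  | [] => srcLen
  | chunk :: rest =>
    if currentLine = line then offset + col
    else aLoop rest (currentLine + 1) (offset + (chunk.length : Int)) line col srcLen

def position_to_offset_py (source : String) (line : Int) (col : Int) : Int :=
  aLoop (splitKEAux [] source.toList) 1 0 line col (source.toList.length : Int)

-- ===== PORT B =====
-- B's while-loop: scan with index i, appending the start offset of each new line to `starts`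
-- (the i+1 < n lookahead source[i+1] == '\n' is r.head? = some '\n'; the `if i < n` append guards
-- are the `if … = []` tests on what remains)
def bLoop (s : List Char) (i : Nat) (starts : List Nat) : List Nat :=
  match s with
  | [] => starts
  | c :: r =>
    if c = '\r' then
      if r.head? = some '\n' then
        bLoop r.tail (i + 2) (if r.tail = [] then starts else starts ++ [i + 2])
      else bLoop r (i + 1) (if r = [] then starts else starts ++ [i + 1])
    else if c = '\n' then bLoop r (i + 1) (if r = [] then starts else starts ++ [i + 1])
    else bLoop r (i + 1) starts
termination_by s.length
decreasing_by all_goals simp [List.length_tail]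

def position_to_offset_py_alt (source : String) (line : Int) (col : Int) : Int :=
  let s := source.toList
  let starts := bLoop s 0 (if s = [] then [] else [0])
  if 1 ≤ line ∧ line ≤ (starts.length : Int) then (starts.getD (line - 1).toNat 0 : Int) + col
  else (s.length : Int)

-- ===== PRECONDITION & SPEC =====
def Spec_position_to_offset_py (source : String) (line : Int) (col : Int) (out : Int) : Prop := out = position_to_offset_py_alt source line col
instance (source : String) (line : Int) (col : Int) (out : Int) : Decidable (Spec_position_to_offset_py source line col out) := by unfold Spec_position_to_offset_py; infer_instance

-- ===== CLAIM (what is proved, stated in full; the proofs are below) =====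
def Claim_equal_position_to_offset_py : Prop := ∀ (source : String) (line : Int) (col : Int), Dom_position_to_offset_py source line col → Spec_position_to_offset_py source line col (position_to_offset_py source line col)

-- ===== LEMMAS AND PROOFS =====

-- start offsets of the chunks of s that come AFTER the chunk the scan is currently in, at index i
def bnds (s : List Char) (i : Nat) : List Nat :=
  match s with
  | [] => []
  | c :: r =>
    if c = '\r' then
      if r.head? = some '\n' then
        if r.tail = [] then [] else (i + 2) :: bnds r.tail (i + 2)
      else if r = [] then [] else (i + 1) :: bnds r (i + 1)
    else if c = '\n' then (if r = [] then [] else (i + 1) :: bnds r (i + 1))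
    else bnds r (i + 1)
termination_by s.length
decreasing_by all_goals simp [List.length_tail]

-- what A's loop computes, phrased as a recursive lookup over the list of chunk-start offsets
def lkp (sts : List Nat) (cl line col srcLen : Int) : Int :=
  match sts with
  | [] => srcLen
  | x :: xs => if cl = line then (x : Int) + col else lkp xs (cl + 1) line col srcLen

theorem bLoop_eq_bnds (s : List Char) (i : Nat) (starts : List Nat) :
    bLoop s i starts = starts ++ bnds s i := by
  fun_induction bLoop s i starts
  all_goals simp_all [bnds]
  all_goals split_ifs with h <;> simp [h, bnds]

theorem aLoop_eq_lkp (line col srcLen : Int) (s acc : List Char) (cl : Int) (start : Nat)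
    (hne : acc ≠ [] ∨ s ≠ []) :
    aLoop (splitKEAux acc s) cl (start : Int) line col srcLen
      = lkp (start :: bnds s (start + acc.length)) cl line col srcLen := by
  fun_induction splitKEAux acc s generalizing cl start
  case case1 =>
    simp at hne
  case case2 acc h =>
    simp [aLoop, bnds, lkp]
  case case3 acc r hh ih =>
    have hr : r = '\n' :: r.tail := by cases r <;> simp_all
    by_cases h : r.tail = []
    · rw [hr, h]
      simp [aLoop, splitKEAux, bnds, lkp]
    · have ih' := ih (cl + 1) (start + acc.length + 2) (Or.inr h)
      simp only [List.length_nil, Nat.add_zero] at ih'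
      have hb : bnds ('\r' :: r) (start + acc.length)
          = (start + acc.length + 2) :: bnds r.tail (start + acc.length + 2) := by
        rw [hr]; simp [bnds, h, ← hr, hh]
      rw [hb]
      simp only [aLoop, lkp]
      split
      · rfl
      · rw [show (start : Int) + ((acc.reverse ++ ['\r', '\n']).length : Int)
            = ((start + acc.length + 2 : Nat) : Int) by push_cast; simp; ring]
        rw [ih']
        simp only [lkp]
  case case4 acc r hh ih =>
    by_cases h : r = []
    · rw [h]
      simp [aLoop, splitKEAux, bnds, lkp]
    · have ih' := ih (cl + 1) (start + acc.length + 1) (Or.inr h)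
      simp only [List.length_nil, Nat.add_zero] at ih'
      have hb : bnds ('\r' :: r) (start + acc.length)
          = (start + acc.length + 1) :: bnds r (start + acc.length + 1) := by
        simp [bnds, h, hh]
      rw [hb]
      simp only [aLoop, lkp]
      split
      · rfl
      · rw [show (start : Int) + ((acc.reverse ++ ['\r']).length : Int)
            = ((start + acc.length + 1 : Nat) : Int) by push_cast; simp; ring]
        rw [ih']
        simp only [lkp]
  case case5 acc r hh ih =>
    by_cases h : r = []
    · rw [h]
      simp [aLoop, splitKEAux, bnds, lkp]
    · have ih' := ih (cl + 1) (start + acc.length + 1) (Or.inr h)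
      simp only [List.length_nil, Nat.add_zero] at ih'
      have hb : bnds ('\n' :: r) (start + acc.length)
          = (start + acc.length + 1) :: bnds r (start + acc.length + 1) := by
        simp [bnds, h]
      rw [hb]
      simp only [aLoop, lkp]
      split
      · rfl
      · rw [show (start : Int) + ((acc.reverse ++ ['\n']).length : Int)
            = ((start + acc.length + 1 : Nat) : Int) by push_cast; simp; ring]
        rw [ih']
        simp only [lkp]
  case case6 acc c r h1 h2 ih =>
    have ih' := ih cl start (Or.inl (by simp))
    have hb : bnds (c :: r) (start + acc.length) = bnds r (start + acc.length + 1) := by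
      simp [bnds, h1, h2]
    rw [hb, ih']
    simp only [List.length_cons, Nat.add_assoc]

theorem lkp_closed (xs : List Nat) (cl line col srcLen : Int) :
    lkp xs cl line col srcLen
      = if cl ≤ line ∧ line < cl + (xs.length : Int)
        then ((xs.getD (line - cl).toNat 0 : Nat) : Int) + col else srcLen := by
  induction xs generalizing cl with
  | nil => simp [lkp]
  | cons x t ih =>
      simp only [lkp, ih, List.length_cons]
      by_cases h : cl = line
      · subst h
        rw [if_pos (by omega)]
        simp
      · rw [if_neg h]
        by_cases h2 : cl + 1 ≤ line ∧ line < cl + 1 + (t.length : Int)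
        · rw [if_pos h2, if_pos (by push_cast; omega)]
          have hk : (line - cl).toNat = (line - (cl + 1)).toNat + 1 := by omega
          rw [hk]
          simp
        · rw [if_neg h2, if_neg (by push_cast; omega)]

-- ===== VERDICT (by name: the statement is the Claim_ definition above) =====
theorem position_to_offset_py_spec : Claim_equal_position_to_offset_py := by
  intro source line col _
  unfold Spec_position_to_offset_py position_to_offset_py position_to_offset_py_alt
  by_cases hs : source.toList = []
  · simp [hs, splitKEAux, aLoop, bLoop]
    omega
  · have h1 := aLoop_eq_lkp line col (source.toList.length : Int) source.toList [] 1 0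
      (Or.inr hs)
    simp only [List.length_nil, Nat.add_zero, Nat.cast_zero] at h1
    rw [show (0 : Int) = ((0 : Nat) : Int) from rfl] at h1 ⊢
    rw [h1, lkp_closed]
    simp only [if_neg hs]
    rw [bLoop_eq_bnds]
    simp only [List.singleton_append, List.length_cons]
    split_ifs with hA hB <;> first | rfl | omega
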